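-- pv_equiv track=rewrite | github.com/stalerik/Uva-Problems | Advent_of_code_2019/Day4_part2.py | large_group
-- ===== SOURCE A (Python) =====
-- def large_group(number):
--     last = ''
--     has_large = False
--     has_two = False
--     c= 1
--     last = number[0]
--     for i in range(1,len(number)):
--         if number[i] == last:
--             c += 1
--         elif number[i] != last:
--             if c == 2:
--
--                 return True
--             else:
--                 last = number[i]
--                 c = 1
--     #Edge case for last number
--     if c == 2:
--         return True
--     else:
--         return False
-- ===== SOURCE B (Python) =====
-- def large_group(number):
--     padded = [None] + list(number) + [None, None]
--     return any(b == c and a != b and c != d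
--                for (a, b, c, d) in zip(padded, padded[1:], padded[2:], padded[3:]))
-- ===== Notes on version B (the rewrite author's own statement) =====
-- stated objective: alternative
-- what changed: Replaces the stateful running-run-counter loop with early return by a single sliding-window pass over a sentinel-padded character list: a run of exactly two is detected as a 4-window (a,b,c,d) with b==c, a!=b, c!=d.
import Mathlib
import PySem

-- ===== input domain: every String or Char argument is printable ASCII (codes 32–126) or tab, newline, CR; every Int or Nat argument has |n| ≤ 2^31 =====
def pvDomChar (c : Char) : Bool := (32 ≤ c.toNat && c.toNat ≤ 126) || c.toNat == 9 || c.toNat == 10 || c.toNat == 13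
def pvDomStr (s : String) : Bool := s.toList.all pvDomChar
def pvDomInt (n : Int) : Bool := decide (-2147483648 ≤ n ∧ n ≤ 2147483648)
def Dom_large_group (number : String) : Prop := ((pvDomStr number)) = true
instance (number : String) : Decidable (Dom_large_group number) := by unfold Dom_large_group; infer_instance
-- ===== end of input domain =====

-- B replaces A's running-run-counter loop by a sliding 4-window scan over a sentinel-padded list (alternative decomposition, same cost).


-- ===== PORT A =====
-- the for-loop over i in range(1, len(number)) with state (last, c); early `return True` propagates up
def large_group_goA (last : Char) (c : Int) : List Char → Bool
  | [] => if c == 2 then true else false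
  | x :: xs =>
    if x == last then large_group_goA last (c + 1) xs
    else -- Python's `elif number[i] != last` always fires here
      if c == 2 then true else large_group_goA x 1 xs

def large_group (number : String) : Bool :=
  match PySem.Str.pyGet? number 0 with
  | none => false   -- Python raises IndexError here; excluded by Pre_large_group
  | some last => large_group_goA last 1 (number.toList.drop 1)

-- ===== PORT B =====
-- window test on one suffix: padded[i..i+3] = (a,b,c,d), true iff b==c and a!=b and c!=d
def large_group_winHead (a : Option Char) : List (Option Char) → Bool
  | b :: c :: d :: _ => b == c && a != b && c != d
  | _ => false

-- scan of all 4-windows (zip of the four shifted lists; short suffixes give no window)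
def large_group_win : List (Option Char) → Bool
  | [] => false
  | a :: rest => large_group_winHead a rest || large_group_win rest

def large_group_alt (number : String) : Bool :=
  large_group_win (none :: number.toList.map some ++ [none, none])

-- ===== PRECONDITION & SPEC =====
-- Pre_ excludes only the empty string, where Python A raises IndexError on number[0].
def Pre_large_group (number : String) : Prop := number ≠ ""
instance (number : String) : Decidable (Pre_large_group number) := by unfold Pre_large_group; infer_instance

def pvWitness_large_group : String := "122345"

def Spec_large_group (number : String) (out : Bool) : Prop := out = large_group_alt number
instance (number : String) (out : Bool) : Decidable (Spec_large_group number out) := by unfold Spec_large_group; infer_instance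

-- ===== CLAIM (what is proved, stated in full; the proofs are below) =====
def Claim_equal_large_group : Prop := ∀ (number : String), Dom_large_group number → Pre_large_group number → Spec_large_group number (large_group number)

-- ===== LEMMAS AND PROOFS =====

theorem win_cons (a : Option Char) (rest : List (Option Char)) :
    large_group_win (a :: rest) = (large_group_winHead a rest || large_group_win rest) := rfl

-- a window whose first two entries are equal is never a hit
theorem winHead_eq_self (l : Option Char) (t : List (Option Char)) :
    large_group_winHead l (l :: t) = false := by
  rcases t with _ | ⟨c, _ | ⟨d, t⟩⟩ <;> simp [large_group_winHead]

-- skipping through the interior of a run: equal neighbours never open a window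
theorem win_skip_run (c : Nat) (l y : Option Char) (rest : List (Option Char)) :
    large_group_win (l :: List.replicate c l ++ y :: rest)
      = large_group_win (l :: y :: rest) := by
  induction c with
  | zero => rfl
  | succ c ih =>
      have h : (l :: List.replicate (c+1) l ++ y :: rest)
          = l :: (l :: List.replicate c l ++ y :: rest) := by
        simp [List.replicate_succ]
      rw [h, win_cons]
      simp only [List.cons_append] at ih ⊢
      rw [winHead_eq_self, Bool.false_or]
      exact ih

-- a window whose middle pair differs contributes nothing
theorem winHead_ne (a b c : Option Char) (r : List (Option Char)) (h : b ≠ c) :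
    large_group_winHead a (b :: c :: r) = false := by
  rcases r with _ | ⟨d, r⟩ <;> simp [large_group_winHead, h]

-- run interior of length ≥ 3 never opens a window at its left edge
theorem winHead_run3 (p l : Option Char) (r : List (Option Char)) :
    large_group_winHead p (l :: l :: l :: r) = false := by
  simp [large_group_winHead]

-- main invariant: loop state (last, run-count c+1) versus the windows of the remaining padded list
theorem goA_eq_win (t : List Char) : ∀ (c : Nat) (last : Char) (p : Option Char),
    p ≠ some last →
    large_group_goA last ((c : Int) + 1) t
      = large_group_win (p :: List.replicate (c + 1) (some last) ++ t.map some ++ [none, none]) := by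
  induction t with
  | nil =>
      intro c last p hp
      match c with
      | 0 =>
          simp [large_group_goA, large_group_win, large_group_winHead]
      | 1 =>
          have hb : (p != some last) = true := by simp [bne, hp]
          simp [large_group_goA, large_group_win, large_group_winHead, hb]
      | (k+2) =>
          have hlist : (p :: List.replicate (k + 2 + 1) (some last) ++ ([] : List Char).map some ++ [none, none])
              = p :: ((some last) :: List.replicate (k + 2) (some last) ++ (none : Option Char) :: [none]) := by
            simp [List.replicate_succ]
          rw [hlist, win_cons, win_skip_run (k+2) (some last) none [none]]
          have hhead : large_group_winHead p ((some last) :: List.replicate (k + 2) (some last) ++ (none : Option Char) :: [none]) = false := by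
            have h3 : ((some last) :: List.replicate (k + 2) (some last) ++ (none : Option Char) :: [none])
                = (some last) :: (some last) :: (some last) :: (List.replicate k (some last) ++ (none : Option Char) :: [none]) := by
              simp [List.replicate_succ]
            rw [h3, winHead_run3]
          rw [hhead]
          have h2 : (((k : Int) + 2) + 1 == 2) = false := by simp; omega
          simp [large_group_goA, large_group_win, large_group_winHead, h2]
  | cons x xs ih =>
      intro c last p hp
      by_cases hx : x = last
      · subst hx
        have hlist : (p :: List.replicate (c + 1) (some x) ++ (x :: xs).map some ++ [none, none])
            = p :: List.replicate (c + 1 + 1) (some x) ++ xs.map some ++ [none, none] := by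
          simp [List.map, List.replicate_succ']
        have lhs : large_group_goA x ((c : Int) + 1) (x :: xs)
            = large_group_goA x (((c + 1 : Nat) : Int) + 1) xs := by
          simp [large_group_goA]
        rw [lhs, hlist, ih (c+1) x p hp]
      · have hbx : (x == last) = false := by simp [hx]
        have hne : (some last : Option Char) ≠ some x := by
          simp only [Ne, Option.some.injEq]; intro h; exact hx h.symm
        match c with
        | 0 =>
            have lhs : large_group_goA last (((0 : Nat) : Int) + 1) (x :: xs)
                = large_group_goA x ((0 : Int) + 1) xs := by
              simp [large_group_goA, hbx]
            have hlist : (p :: List.replicate (0 + 1) (some last) ++ (x :: xs).map some ++ [none, none])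
                = p :: some last :: some x :: (xs.map some ++ [none, none]) := by simp
            rw [lhs, hlist, win_cons, winHead_ne p (some last) (some x) _ hne]
            have rhs := ih 0 x (some last) hne
            simp only [Nat.cast_zero] at rhs
            rw [rhs]; simp
        | 1 =>
            have lhs : large_group_goA last (((1 : Nat) : Int) + 1) (x :: xs) = true := by
              simp [large_group_goA, hbx]
            have hb : (p != some last) = true := by simp [bne, hp]
            have hd : ((some last : Option Char) != some x) = true := by
              simp [bne]; intro h; exact hx h.symm
            have hlist : (p :: List.replicate (1 + 1) (some last) ++ (x :: xs).map some ++ [none, none])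
                = p :: some last :: some last :: some x :: (xs.map some ++ [none, none]) := by
              simp [List.replicate_succ]
            rw [lhs, hlist, win_cons]
            simp [large_group_winHead, hb, hd]
        | (k+2) =>
            have h2 : (((k : Int) + 2) + 1 == 2) = false := by simp; omega
            have lhs : large_group_goA last (((k+2 : Nat) : Int) + 1) (x :: xs)
                = large_group_goA x ((0 : Int) + 1) xs := by
              simp [large_group_goA, hbx, h2]
            have hlist : (p :: List.replicate (k + 2 + 1) (some last) ++ (x :: xs).map some ++ [none, none])
                = p :: ((some last) :: List.replicate (k + 2) (some last) ++ some x :: (xs.map some ++ [none, none])) := by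
              simp [List.replicate_succ]
            rw [lhs, hlist, win_cons, win_skip_run (k+2) (some last) (some x) (xs.map some ++ [none, none])]
            have hhead : large_group_winHead p ((some last) :: List.replicate (k + 2) (some last) ++ some x :: (xs.map some ++ [none, none])) = false := by
              have h3 : ((some last) :: List.replicate (k + 2) (some last) ++ some x :: (xs.map some ++ [none, none]))
                  = (some last) :: (some last) :: (some last) :: (List.replicate k (some last) ++ some x :: (xs.map some ++ [none, none])) := by
                simp [List.replicate_succ]
              rw [h3, winHead_run3]
            rw [hhead]
            have rhs := ih 0 x (some last) hne
            simp only [Nat.cast_zero] at rhs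
            rw [rhs]
            have hlist2 : (some last :: List.replicate (0 + 1) (some x) ++ xs.map some ++ [none, none])
                = some last :: some x :: (xs.map some ++ [none, none]) := by simp
            rw [hlist2]; simp

-- ===== VERDICT (by name: the statement is the Claim_ definition above) =====
theorem large_group_spec : Claim_equal_large_group := by
  intro number _ hpre
  unfold Spec_large_group large_group large_group_alt
  rcases hL : number.toList with _ | ⟨h, t⟩
  · exact absurd (String.toList_eq_nil_iff.mp hL) hpre
  · have hget : PySem.Str.pyGet? number 0 = some h := by
      simp [PySem.Str.pyGet?, hL]
    rw [hget]
    have hmain := goA_eq_win t 0 h none (by simp)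
    simp only [Nat.cast_zero, zero_add] at hmain
    simpa [hL] using hmain
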